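-- pv_equiv track=rewrite | github.com/qxz-coder/VersionSeek | ResponseProcessing/Dubbo/greedy.py | split_version_by_greedy
-- ===== SOURCE A (Python) =====
-- def split_version_by_greedy(probe_data:dict,target_version:str):
--     '''
--     Input: A dictionary where keys are probe names and values are lists of sets.
--     Output: A greedy selection of probes that maximizes distinctions.
--     '''
--     all_versions = set()
--     for probe in probe_data:
--         for version_set in probe_data[probe]:
--             all_versions.update(version_set)
--
--     if target_version not in all_versions:
--         # raise ValueError("Target version not in version set.")
--         return [],all_versions
--
--     not_distinguished_set = all_versions.copy()
--     # if target_version in not_distinguished_set: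
--     not_distinguished_set.remove(target_version)
--
--     selected_probes = []
--     while True:
--         max_num_versions = 0
--         best_probe = None
--         for probe,version_sets_by_probe in probe_data.items():
--
--             if probe in selected_probes:
--                 continue
--
--             for version_set in version_sets_by_probe:
--                 if target_version in version_set:
--                     remains = all_versions.difference(version_set)
--
--                     intersection = remains.intersection(not_distinguished_set)
--                     if len(intersection) > max_num_versions:
--                         max_num_versions = len(intersection)
--                         best_probe = probe
--
--
--         if best_probe is None:
--             break
--
--
--         selected_probes.append(best_probe)
--
--         for version_set in probe_data[best_probe]:
--             if target_version in version_set: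
--                 remains = all_versions.difference(version_set)
--                 not_distinguished_set = not_distinguished_set.difference(remains)
--
--     return selected_probes,not_distinguished_set
-- ===== SOURCE B (Python) =====
-- def split_version_by_greedy(probe_data: dict, target_version: str):
--     all_versions = set()
--     for sets in probe_data.values():
--         for vs in sets:
--             all_versions |= vs
--     if target_version not in all_versions:
--         return [], all_versions
--
--     # Invert the data once: keep only the qualifying sets (those containing the
--     # target) and build an inverted index version -> {(probe_idx, set_idx)}.
--     # Each round is then pure integer counting over the shrinking undistinguished
--     # set (score = |undist| - min hits); no set algebra per round.
--     probes = list(probe_data)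
--     qual = [[vs for vs in sets if target_version in vs] for sets in probe_data.values()]
--     nsets = [len(sets) for sets in qual]
--     index = {}
--     for i, sets in enumerate(qual):
--         for j, vs in enumerate(sets):
--             for v in vs:
--                 index.setdefault(v, set()).add((i, j))
--
--     undist = {v for v in all_versions if v != target_version}
--     remaining = list(range(len(probes)))
--     selected = []
--     while True:
--         cnt = {}
--         for v in undist:
--             for key in index.get(v, ()):
--                 cnt[key] = cnt.get(key, 0) + 1
--         length = len(undist)
--         best = None
--         best_score = 0
--         for i in remaining:
--             if nsets[i]:
--                 s = length - min(cnt.get((i, j), 0) for j in range(nsets[i]))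
--                 if s > best_score:
--                     best, best_score = i, s
--         if best is None:
--             break
--         selected.append(probes[best])
--         remaining = [r for r in remaining if r != best]
--         undist = {v for v in undist
--                   if all((best, j) in index.get(v, ()) for j in range(nsets[best]))}
--     return selected, undist
-- ===== Notes on version B (the rewrite author's own statement) =====
-- stated objective: alternative
-- what changed: B replaces A's per-round set algebra (complement/difference/intersection of version sets) by a one-time inverted index version -> qualifying (probe,set) slots; each greedy round is a single counting sweep over the shrinking undistinguished versions (score = |undist| - min hits) and the update is one membership filter, with probes tracked by a shrinking index list instead of re-skipping selected names.
import Mathlib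
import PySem

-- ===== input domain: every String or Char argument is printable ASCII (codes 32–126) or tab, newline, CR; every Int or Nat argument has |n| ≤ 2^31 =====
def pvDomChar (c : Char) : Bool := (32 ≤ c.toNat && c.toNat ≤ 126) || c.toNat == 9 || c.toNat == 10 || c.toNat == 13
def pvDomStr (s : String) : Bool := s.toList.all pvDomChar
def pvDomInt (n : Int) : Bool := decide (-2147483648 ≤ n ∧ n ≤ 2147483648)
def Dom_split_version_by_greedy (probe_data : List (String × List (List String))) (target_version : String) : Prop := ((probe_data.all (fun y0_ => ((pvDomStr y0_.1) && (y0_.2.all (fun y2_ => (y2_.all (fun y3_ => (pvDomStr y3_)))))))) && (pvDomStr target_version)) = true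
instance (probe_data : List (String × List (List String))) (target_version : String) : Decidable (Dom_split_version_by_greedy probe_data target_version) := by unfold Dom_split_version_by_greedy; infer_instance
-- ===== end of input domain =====

-- B inverts the data once into an index version ↦ qualifying (probe,set) slots and runs each
-- greedy round by integer counting over the undistinguished versions (score = |undist| − min hits),
-- with no per-round set algebra (objective: alternative; equivalence proved on dict-like inputs,
-- i.e. no duplicate keys).


-- ===== PORT A =====
-- A's `while True` loop: each iteration either breaks or appends a new probe key to
-- selected_probes, so probe_data.length + 1 rounds of fuel are never exhausted.
def pvLoopA (probe_data : List (String × List (List String))) (target_version : String)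
    (allv : PySem.Set String) :
    Nat → List String → PySem.Set String → List String × List String
  | 0, selected, nd => (selected, nd)
  | fuel + 1, selected, nd =>
    let best := probe_data.foldl
      (fun (acc : Int × Option String) p =>
        if selected.contains p.1 then acc
        else p.2.foldl
          (fun (acc : Int × Option String) vs =>
            if PySem.Set.contains vs target_version then
              let remains := PySem.Set.diff allv vs
              let inter := PySem.Set.inter remains nd
              if PySem.Set.len inter > acc.1 then (PySem.Set.len inter, some p.1) else acc
            else acc) acc) (0, none)
    match best.2 with
    | none => (selected, nd)
    | some bp =>
      let selected' := selected ++ [bp]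
      let nd' := ((PySem.Dict.mk probe_data).getD bp []).foldl
        (fun nd vs =>
          if PySem.Set.contains vs target_version then
            PySem.Set.diff nd (PySem.Set.diff allv vs)
          else nd) nd
      pvLoopA probe_data target_version allv fuel selected' nd'

def split_version_by_greedy (probe_data : List (String × List (List String))) (target_version : String) : List String × List String :=
  let all_versions : PySem.Set String :=
    probe_data.foldl (fun s p => p.2.foldl (fun s vs => PySem.Set.update s vs) s) PySem.Set.empty
  if !(PySem.Set.contains all_versions target_version) then ([], all_versions)
  else
    -- target_version ∈ all_versions here, so set.remove = set.discard (no KeyError)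
    let nd := PySem.Set.discard all_versions target_version
    pvLoopA probe_data target_version all_versions (probe_data.length + 1) [] nd

-- ===== PORT B =====
-- the inverted index: version v ↦ set of slots (i, j) with v ∈ qual[i][j]
-- (Python's (probe_idx, set_idx) int pairs are modelled as Nat × Nat: both are nonnegative)
def pvIndexB (qual : List (List (List String))) : PySem.Dict String (PySem.Set (Nat × Nat)) :=
  qual.zipIdx.foldl (fun d si =>
    si.1.zipIdx.foldl (fun d tj =>
      tj.1.foldl (fun d v =>
        d.insert v (PySem.Set.add (d.getD v PySem.Set.empty) (si.2, tj.2))) d) d)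
    PySem.Dict.empty

-- the per-round hit counter: cnt[key] = how many undistinguished versions index to key
def pvCntB (index : PySem.Dict String (PySem.Set (Nat × Nat))) (undist : PySem.Set String) :
    PySem.Dict (Nat × Nat) Int :=
  undist.foldl (fun c v =>
    (index.getD v PySem.Set.empty).foldl (fun c key => c.insert key (c.getD key 0 + 1)) c)
    PySem.Dict.empty

-- Python's min(...) over a nonempty sequence (every call site guards nsets[i] ≠ 0,
-- so the [] branch is unreachable)
def pvMinB : List Int → Int
  | [] => 0
  | x :: t => t.foldl min x

-- B's `while True` loop: remaining shrinks by one index per round, so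
-- probe_data.length + 1 rounds of fuel are never exhausted.
def pvLoopB (probes : List String) (nsets : List Nat)
    (index : PySem.Dict String (PySem.Set (Nat × Nat))) :
    Nat → List Nat → PySem.Set String → List String → List String × List String
  | 0, _, undist, selected => (selected, undist)
  | fuel + 1, remaining, undist, selected =>
    let cnt := pvCntB index undist
    let length := PySem.Set.len undist
    let best := remaining.foldl
      (fun (acc : Int × Option Nat) i =>
        if nsets.getD i 0 ≠ 0 then
          let s := length - pvMinB ((List.range (nsets.getD i 0)).map (fun j => cnt.getD (i, j) 0))
          if s > acc.1 then (s, some i) else acc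
        else acc) (0, none)
    match best.2 with
    | none => (selected, undist)
    | some b =>
      pvLoopB probes nsets index fuel
        (remaining.filter (fun r => r != b))
        (undist.filter (fun v => (List.range (nsets.getD b 0)).all
          (fun j => PySem.Set.contains (index.getD v PySem.Set.empty) (b, j))))
        (selected ++ [probes.getD b ""])

def split_version_by_greedy_alt (probe_data : List (String × List (List String))) (target_version : String) : List String × List String :=
  let all_versions : PySem.Set String :=
    probe_data.foldl (fun s p => p.2.foldl (fun s vs => PySem.Set.union s vs) s) PySem.Set.empty
  if !(PySem.Set.contains all_versions target_version) then ([], all_versions)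
  else
    let probes := probe_data.map Prod.fst
    let qual := probe_data.map (fun p => p.2.filter (fun vs => vs.contains target_version))
    let nsets := qual.map List.length
    let index := pvIndexB qual
    -- {v for v in all_versions if v != target_version}: a filtered Set stays a Set
    let undist := all_versions.filter (fun v => v != target_version)
    pvLoopB probes nsets index (probe_data.length + 1) (List.range probes.length) undist []

-- ===== PRECONDITION & SPEC =====
-- Pre_ excludes association lists with duplicate probe names: A's parameter is a Python
-- dict, which cannot carry duplicate keys, so such lists correspond to no call of A.
def Pre_split_version_by_greedy (probe_data : List (String × List (List String))) (target_version : String) : Prop :=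
  (probe_data.map Prod.fst).Nodup
instance (probe_data : List (String × List (List String))) (target_version : String) : Decidable (Pre_split_version_by_greedy probe_data target_version) := by unfold Pre_split_version_by_greedy; infer_instance

def pvWitness_split_version_by_greedy : (List (String × List (List String))) × String :=
  ([("p1", [["v1", "v2"]]), ("p2", [["v1"]])], "v1")

def Spec_split_version_by_greedy (probe_data : List (String × List (List String))) (target_version : String) (out : List String × List String) : Prop := out = split_version_by_greedy_alt probe_data target_version
instance (probe_data : List (String × List (List String))) (target_version : String) (out : List String × List String) : Decidable (Spec_split_version_by_greedy probe_data target_version out) := by unfold Spec_split_version_by_greedy; infer_instance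

-- ===== CLAIM (what is proved, stated in full; the proofs are below) =====
def Claim_equal_split_version_by_greedy : Prop := ∀ (probe_data : List (String × List (List String))) (target_version : String), Dom_split_version_by_greedy probe_data target_version → Pre_split_version_by_greedy probe_data target_version → Spec_split_version_by_greedy probe_data target_version (split_version_by_greedy probe_data target_version)

-- ===== LEMMAS AND PROOFS =====

def pvScr (allv nd : PySem.Set String) (vs : List String) : Int :=
  PySem.Set.len (PySem.Set.inter (PySem.Set.diff allv vs) nd)
def pvTrips (qual : List (List (List String))) : List (String × (Nat × Nat)) :=
  qual.zipIdx.flatMap (fun si => si.1.zipIdx.flatMap (fun tj => tj.1.map (fun v => (v, (si.2, tj.2)))))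
def pvBuild (trips : List (String × (Nat × Nat))) (d : PySem.Dict String (PySem.Set (Nat × Nat))) :
    PySem.Dict String (PySem.Set (Nat × Nat)) :=
  trips.foldl (fun d t => d.insert t.1 (PySem.Set.add (d.getD t.1 PySem.Set.empty) t.2)) d

lemma pvIndexB_eq (qual : List (List (List String))) :
    pvIndexB qual = pvBuild (pvTrips qual) PySem.Dict.empty := by
  simp [pvIndexB, pvBuild, pvTrips, List.foldl_flatMap, List.foldl_map]

lemma pvBuild_getD_nodup (trips : List (String × (Nat × Nat))) :
    ∀ (d : PySem.Dict String (PySem.Set (Nat × Nat))),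
      (∀ v, (d.getD v PySem.Set.empty).Nodup) →
      ∀ v, ((pvBuild trips d).getD v PySem.Set.empty).Nodup := by
  induction trips with
  | nil => intro d h v; exact h v
  | cons t rest ih =>
    intro d h v
    refine ih _ ?_ v
    intro w
    rw [PySem.Dict.getD_insert]
    by_cases hw : w = t.1
    · simp only [if_pos hw]
      exact PySem.Set.nodup_add _ _ (h t.1)
    · simp only [if_neg hw]; exact h w

lemma pvIndexB_nodup (qual : List (List (List String))) (v : String) :
    ((pvIndexB qual).getD v PySem.Set.empty).Nodup := by
  rw [pvIndexB_eq]
  exact pvBuild_getD_nodup _ _ (fun w => by simp [PySem.Dict.getD_empty, PySem.Set.empty]) v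


lemma pvCntB_getD (index : PySem.Dict String (PySem.Set (Nat × Nat)))
    (hnd : ∀ v, (index.getD v PySem.Set.empty).Nodup) (key : Nat × Nat) :
    ∀ (l : List String) (c : PySem.Dict (Nat × Nat) Int),
      ((l.foldl (fun c v =>
          (index.getD v PySem.Set.empty).foldl
            (fun c key => c.insert key (c.getD key 0 + 1)) c) c).getD key 0)
        = c.getD key 0
          + (l.countP (fun v => PySem.Set.contains (index.getD v PySem.Set.empty) key) : Int) := by
  intro l
  induction l with
  | nil => intro c; simp
  | cons v rest ih =>
    intro c
    rw [List.foldl_cons, ih, PySem.Dict.getD_foldl_insert_add_one, List.countP_cons]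
    by_cases hv : PySem.Set.contains (index.getD v PySem.Set.empty) key = true
    · rw [List.count_eq_one_of_mem (hnd v) ((PySem.Set.contains_iff _ _).mp hv)]
      simp only [hv, if_true]
      push_cast
      ring
    · rw [List.count_eq_zero.mpr (fun hm => hv ((PySem.Set.contains_iff _ _).mpr hm))]
      simp only [hv, if_false]
      push_cast
      ring

lemma pvBuild_getD_mem (trips : List (String × (Nat × Nat))) :
    ∀ (d : PySem.Dict String (PySem.Set (Nat × Nat))) (v : String) (p : Nat × Nat),
      p ∈ (pvBuild trips d).getD v PySem.Set.empty ↔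
        p ∈ d.getD v PySem.Set.empty ∨ (v, p) ∈ trips := by
  induction trips with
  | nil => intro d v p; simp [pvBuild]
  | cons t rest ih =>
    intro d v p
    obtain ⟨w, q⟩ := t
    rw [show pvBuild ((w, q) :: rest) d
        = pvBuild rest (d.insert w (PySem.Set.add (d.getD w PySem.Set.empty) q)) from rfl,
      ih, PySem.Dict.getD_insert]
    by_cases hv : v = w
    · subst hv
      simp only [eq_self_iff_true, if_true, PySem.Set.mem_add, List.mem_cons, Prod.mk.injEq]
      tauto
    · simp only [if_neg hv, List.mem_cons, Prod.mk.injEq]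
      tauto

lemma pvTrips_mem (qual : List (List (List String))) (v : String) (p : Nat × Nat) :
    (v, p) ∈ pvTrips qual ↔
      ∃ (hi : p.1 < qual.length) (hj : p.2 < qual[p.1].length), v ∈ qual[p.1][p.2] := by
  obtain ⟨i, j⟩ := p
  simp only [pvTrips, List.mem_flatMap, List.mem_map]
  constructor
  · rintro ⟨⟨s, i'⟩, hsi, ⟨t, j'⟩, htj, w, hw, heq⟩
    dsimp only at hsi htj hw heq
    injection heq with h1 h2
    injection h2 with h3 h4
    subst h1; subst h3; subst h4
    rw [List.mem_zipIdx_iff_getElem?] at hsi htj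
    dsimp only at hsi htj
    obtain ⟨hi, hs⟩ := List.getElem?_eq_some_iff.mp hsi
    have hqt : qual[i'][j']? = some t := by rw [hs]; exact htj
    obtain ⟨hj, htt⟩ := List.getElem?_eq_some_iff.mp hqt
    exact ⟨hi, hj, by rw [htt]; exact hw⟩
  · rintro ⟨hi, hj, hv⟩
    refine ⟨(qual[i], i), ?_, (qual[i][j], j), ?_, v, hv, rfl⟩
    · rw [List.mem_zipIdx_iff_getElem?]; exact List.getElem?_eq_getElem hi
    · rw [List.mem_zipIdx_iff_getElem?]; exact List.getElem?_eq_getElem hj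

lemma pvIndexB_mem (qual : List (List (List String))) (v : String) (p : Nat × Nat) :
    p ∈ (pvIndexB qual).getD v PySem.Set.empty ↔
      ∃ (hi : p.1 < qual.length) (hj : p.2 < qual[p.1].length), v ∈ qual[p.1][p.2] := by
  rw [pvIndexB_eq, pvBuild_getD_mem, ← pvTrips_mem]
  simp [PySem.Dict.getD_empty, PySem.Set.empty]


lemma pvScr_count (allv nd : PySem.Set String) (vs : List String)
    (hna : allv.Nodup) (hnn : nd.Nodup) (hsub : ∀ x ∈ nd, x ∈ allv) :
    pvScr allv nd vs = (nd.length : Int) - (nd.countP (fun v => vs.contains v) : Int) := by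
  have hL1 : PySem.Set.inter (PySem.Set.diff allv vs) nd
      = (allv.filter (fun x => !(PySem.Set.contains vs x))).filter
          (fun x => PySem.Set.contains nd x) := rfl
  have hperm : (PySem.Set.inter (PySem.Set.diff allv vs) nd).Perm
      (nd.filter (fun v => !(vs.contains v))) := by
    rw [hL1]
    refine (List.perm_ext_iff_of_nodup ((hna.filter _).filter _) (hnn.filter _)).mpr ?_
    intro x
    simp only [List.mem_filter, PySem.Set.contains_eq_listContains, List.contains_iff_mem,
      Bool.not_eq_true', decide_eq_false_iff_not, decide_eq_true_eq]
    constructor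
    · rintro ⟨⟨_, h1⟩, h2⟩; exact ⟨h2, by simpa using h1⟩
    · rintro ⟨h1, h2⟩; exact ⟨⟨hsub x h1, by simpa using h2⟩, h1⟩
  have hlen : (PySem.Set.inter (PySem.Set.diff allv vs) nd).length
      = (nd.filter (fun v => !(vs.contains v))).length := hperm.length_eq
  have hcnt := List.length_eq_countP_add_countP (fun v => vs.contains v) (l := nd)
  have hcc : nd.countP (fun a => decide ¬(vs.contains a) = true)
      = nd.countP (fun v => !(vs.contains v)) := by
    apply List.countP_congr; intro x _; simp
  have hfc : (nd.filter (fun v => !(vs.contains v))).length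
      = nd.countP (fun v => !(vs.contains v)) := List.countP_eq_length_filter.symm
  simp only [pvScr, PySem.Set.len, hlen, hfc]
  omega

lemma pvFoldlMinMin (t : List Int) : ∀ a b : Int, t.foldl min (min a b) = min a (t.foldl min b) := by
  induction t with
  | nil => intro a b; simp
  | cons y t ih =>
    intro a b
    simp only [List.foldl_cons]
    rw [show min (min a b) y = min a (min b y) by omega, ih]

lemma pvMaxMinInt (L : Int) : ∀ (t : List Int) (x a : Int),
    (x :: t).foldl (fun a c => max a (L - c)) a = max a (L - pvMinB (x :: t)) := by
  intro t
  induction t with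
  | nil => intro x a; simp [pvMinB]
  | cons y t ih =>
    intro x a
    have h1 : (x :: y :: t).foldl (fun a c => max a (L - c)) a
        = (y :: t).foldl (fun a c => max a (L - c)) (max a (L - x)) := rfl
    rw [h1, ih]
    simp only [pvMinB, List.foldl_cons]
    rw [show t.foldl min (min x y) = min x (t.foldl min y) from pvFoldlMinMin t x y]
    omega


def pvD0 : String × List (List String) := ("", [])

def pvQual (tv : String) (probe_data : List (String × List (List String))) :
    List (List (List String)) :=
  probe_data.map (fun p => p.2.filter (fun vs => vs.contains tv))

lemma pvGetDMap {α β : Type} (l : List α) (f : α → β) (i : Nat) (hi : i < l.length)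
    (d : α) (d' : β) : (l.map f).getD i d' = f (l.getD i d) := by
  rw [List.getD_eq_getElem _ _ (by simpa using hi), List.getD_eq_getElem _ _ hi,
    List.getElem_map]

def pvG (tv : String) (allv nd : PySem.Set String) (m : Int) (sets : List (List String)) : Int :=
  sets.foldl (fun m vs => if PySem.Set.contains vs tv then max m (pvScr allv nd vs) else m) m

lemma pvScr_nonneg (allv nd : PySem.Set String) (vs : List String) : 0 ≤ pvScr allv nd vs := by
  simp [pvScr, PySem.Set.len]

lemma pvG_mono (tv : String) (allv nd : PySem.Set String) (sets : List (List String)) :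
    ∀ m : Int, m ≤ pvG tv allv nd m sets := by
  induction sets with
  | nil => intro m; simp [pvG]
  | cons vs rest ih =>
    intro m
    simp only [pvG, List.foldl_cons]
    by_cases h : PySem.Set.contains vs tv
    · rw [if_pos h]
      exact le_trans (le_max_left m (pvScr allv nd vs)) (ih _)
    · rw [if_neg h]
      exact ih m

lemma pvG_max (tv : String) (allv nd : PySem.Set String) (sets : List (List String)) :
    ∀ m : Int, 0 ≤ m → pvG tv allv nd m sets = max m (pvG tv allv nd 0 sets) := by
  induction sets with
  | nil => intro m hm; simp [pvG]; omega
  | cons vs rest ih =>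
    intro m hm
    have hs := pvScr_nonneg allv nd vs
    by_cases h : PySem.Set.contains vs tv
    · have h1 := ih (max m (pvScr allv nd vs)) (by omega)
      have h2 := ih (max 0 (pvScr allv nd vs)) (by omega)
      simp only [pvG, List.foldl_cons, h, if_true] at *
      omega
    · simp only [pvG, List.foldl_cons, h, Bool.false_eq_true, if_false] at *
      exact ih m hm

-- A's inner scan over one probe's version sets, in closed form
lemma pvInnerA (tv : String) (allv nd : PySem.Set String) (p1 : String)
    (sets : List (List String)) :
    ∀ acc : Int × Option String,
    sets.foldl
      (fun (acc : Int × Option String) vs =>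
        if PySem.Set.contains vs tv then
          let remains := PySem.Set.diff allv vs
          let inter := PySem.Set.inter remains nd
          if PySem.Set.len inter > acc.1 then (PySem.Set.len inter, some p1) else acc
        else acc) acc
    = (pvG tv allv nd acc.1 sets,
       if acc.1 < pvG tv allv nd acc.1 sets then some p1 else acc.2) := by
  induction sets with
  | nil =>
    intro acc
    simp [pvG]
  | cons vs rest ih =>
    intro acc
    have hlen : PySem.Set.len (PySem.Set.inter (PySem.Set.diff allv vs) nd)
        = pvScr allv nd vs := rfl
    by_cases h : PySem.Set.contains vs tv
    · simp only [List.foldl_cons, h, if_true, hlen]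
      by_cases hcmp : pvScr allv nd vs > acc.1
      · rw [if_pos hcmp, ih]
        have hle := pvG_mono tv allv nd rest (pvScr allv nd vs)
        have hmax : pvG tv allv nd acc.1 (vs :: rest)
            = pvG tv allv nd (pvScr allv nd vs) rest := by
          simp only [pvG, List.foldl_cons, h, if_true]
          congr 1
          omega
        rw [hmax]
        have : acc.1 < pvG tv allv nd (pvScr allv nd vs) rest := by omega
        simp [this]
      · rw [if_neg hcmp, ih]
        have hmax : pvG tv allv nd acc.1 (vs :: rest) = pvG tv allv nd acc.1 rest := by
          simp only [pvG, List.foldl_cons, h, if_true]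
          congr 1
          omega
        rw [hmax]
    · simp only [List.foldl_cons, h, Bool.false_eq_true, if_false]
      rw [ih]
      have hmax : pvG tv allv nd acc.1 (vs :: rest) = pvG tv allv nd acc.1 rest := by
        simp only [pvG, List.foldl_cons, h, Bool.false_eq_true, if_false]
      rw [hmax]


lemma pvScoreEq (tv : String) (allv nd : PySem.Set String)
    (probe_data : List (String × List (List String))) (i : Nat) (hi : i < probe_data.length)
    (hna : allv.Nodup) (hnn : nd.Nodup) (hsub : ∀ x ∈ nd, x ∈ allv) :
    pvG tv allv nd 0 (probe_data.getD i pvD0).2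
      = if ((pvQual tv probe_data).getD i []).length = 0 then 0
        else (nd.length : Int)
          - pvMinB ((List.range ((pvQual tv probe_data).getD i []).length).map
              (fun j => (pvCntB (pvIndexB (pvQual tv probe_data)) nd).getD (i, j) 0)) := by
  have hqual : (pvQual tv probe_data).getD i []
      = ((probe_data.getD i pvD0).2).filter (fun vs => vs.contains tv) :=
    pvGetDMap probe_data _ i hi pvD0 []
  set qs := ((probe_data.getD i pvD0).2).filter (fun vs => vs.contains tv) with hqs
  -- A's conditional fold over all sets is the max-fold over the qualifying sets
  have hA : pvG tv allv nd 0 (probe_data.getD i pvD0).2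
      = qs.foldl (fun a vs => max a (pvScr allv nd vs)) 0 := by
    rw [hqs, show ((probe_data.getD i pvD0).2).filter (fun vs => vs.contains tv)
        = ((probe_data.getD i pvD0).2).filter (fun vs => PySem.Set.contains vs tv) by
      simp, List.foldl_filter]
    rfl
  -- each score is |nd| − count
  have hB : qs.foldl (fun a vs => max a (pvScr allv nd vs)) 0
      = qs.foldl (fun a vs => max a ((nd.length : Int)
          - (nd.countP (fun v => vs.contains v) : Int))) 0 := by
    congr 1
    funext a vs
    rw [pvScr_count allv nd vs hna hnn hsub]
  -- B's range-mapped count list is the per-qualifying-set count list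
  have hlist : (List.range qs.length).map
        (fun j => (pvCntB (pvIndexB (pvQual tv probe_data)) nd).getD (i, j) 0)
      = qs.map (fun vs => (nd.countP (fun v => vs.contains v) : Int)) := by
    apply List.ext_getElem
    · simp
    · intro j hj1 hj2
      simp only [List.getElem_map, List.getElem_range]
      have hj : j < qs.length := by simpa using hj1
      show (pvCntB (pvIndexB (pvQual tv probe_data)) nd).getD (i, j) 0 = _
      rw [show pvCntB (pvIndexB (pvQual tv probe_data)) nd
          = nd.foldl (fun c v =>
              ((pvIndexB (pvQual tv probe_data)).getD v PySem.Set.empty).foldl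
                (fun c key => c.insert key (c.getD key 0 + 1)) c) PySem.Dict.empty from rfl,
        pvCntB_getD _ (pvIndexB_nodup _) (i, j) nd PySem.Dict.empty]
      rw [PySem.Dict.getD_empty]
      have hcp : ∀ v ∈ nd,
          PySem.Set.contains ((pvIndexB (pvQual tv probe_data)).getD v PySem.Set.empty) (i, j)
            = true ↔ qs[j].contains v = true := by
        intro v _
        rw [PySem.Set.contains_iff, pvIndexB_mem]
        have hiq : i < (pvQual tv probe_data).length := by simp [pvQual, hi]
        have hqe : (pvQual tv probe_data)[i] = qs := by
          rw [← hqual, List.getD_eq_getElem _ _ hiq]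
        dsimp only
        constructor
        · rintro ⟨hi', hj', hv⟩
          rw [List.contains_iff_mem]
          have hee : (pvQual tv probe_data)[i][j]'hj' = qs[j] := by simp only [hqe]
          rwa [hee] at hv
        · intro hv
          exact ⟨hiq, by simp [hqe, hj], by simp only [hqe]; exact List.contains_iff_mem.mp hv⟩
      rw [List.countP_congr hcp]
      simp only [zero_add]
  rw [hA, hB, hqual]
  by_cases hq : qs = []
  · simp [hq]
  · obtain ⟨c, rest, hcr⟩ := List.exists_cons_of_ne_nil hq
    rw [if_neg (by simp [hcr]), hlist]
    rw [show qs.foldl (fun a vs => max a ((nd.length : Int)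
          - (nd.countP (fun v => vs.contains v) : Int))) 0
        = (qs.map (fun vs => (nd.countP (fun v => vs.contains v) : Int))).foldl
            (fun a c => max a ((nd.length : Int) - c)) 0 by rw [List.foldl_map]]
    rw [hcr, List.map_cons, pvMaxMinInt]
    have h1 : pvMinB ((nd.countP (fun v => c.contains v) : Int)
        :: (rest.map (fun vs => (nd.countP (fun v => vs.contains v) : Int))))
        ≤ (nd.countP (fun v => c.contains v) : Int) :=
      (PySem.List.foldl_min_le _ _).1
    have h2 : (nd.countP (fun v => c.contains v) : Int) ≤ (nd.length : Int) := by
      exact_mod_cast List.countP_le_length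
    omega

lemma pvSelfMap {α : Type} (l : List α) (d : α) :
    (List.range l.length).map (fun i => l.getD i d) = l := by
  apply List.ext_getElem
  · simp
  · intro i h1 h2
    simp [List.getElem?_eq_getElem h2]

lemma pvDiffStep (tv : String) (allv : PySem.Set String) (vs : List String)
    (nd : PySem.Set String) (hsub : ∀ x ∈ nd, x ∈ allv) :
    PySem.Set.diff nd (PySem.Set.diff allv vs) = nd.filter (fun v => vs.contains v) := by
  show nd.filter _ = _
  apply List.filter_congr
  intro x hx
  simp only [PySem.Set.contains_eq_listContains, List.contains_iff_mem, Bool.not_eq_true',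
    decide_eq_false_iff_not, List.mem_filter, PySem.Set.diff]
  by_cases hv : x ∈ vs
  · simp [hv]
  · simp [hv, hsub x hx]

lemma pvUpdateA (tv : String) (allv : PySem.Set String) (sets : List (List String)) :
    ∀ nd : PySem.Set String, (∀ x ∈ nd, x ∈ allv) →
    sets.foldl (fun nd vs =>
        if PySem.Set.contains vs tv then PySem.Set.diff nd (PySem.Set.diff allv vs) else nd) nd
      = nd.filter (fun v =>
          (sets.filter (fun vs => vs.contains tv)).all (fun vs => vs.contains v)) := by
  induction sets with
  | nil => intro nd _; simp
  | cons vs rest ih =>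
    intro nd hsub
    rw [List.foldl_cons]
    by_cases h : PySem.Set.contains vs tv
    · rw [if_pos h, pvDiffStep tv allv vs nd hsub,
        ih _ (fun x hx => hsub x (List.mem_of_mem_filter hx)), List.filter_filter]
      rw [show (vs :: rest).filter (fun vs => vs.contains tv)
          = vs :: rest.filter (fun vs => vs.contains tv) by
        simp only [List.filter_cons]
        rw [if_pos (by simpa using h)]]
      apply List.filter_congr
      intro x _
      simp only [List.all_cons, Bool.and_comm]
    · rw [if_neg h, ih nd hsub]
      congr 1
      rw [show (vs :: rest).filter (fun vs => vs.contains tv)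
          = rest.filter (fun vs => vs.contains tv) by
        simp only [List.filter_cons]
        rw [if_neg (by simpa using h)]]

lemma pvUpdPredB (tv : String) (probe_data : List (String × List (List String)))
    (b : Nat) (hb : b < probe_data.length) (v : String) :
    ((List.range ((pvQual tv probe_data).getD b []).length).all
        (fun j => PySem.Set.contains
          ((pvIndexB (pvQual tv probe_data)).getD v PySem.Set.empty) (b, j)))
      = (((probe_data.getD b pvD0).2).filter (fun vs => vs.contains tv)).all
          (fun vs => vs.contains v) := by
  have hqual : (pvQual tv probe_data).getD b []
      = ((probe_data.getD b pvD0).2).filter (fun vs => vs.contains tv) :=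
    pvGetDMap probe_data _ b hb pvD0 []
  set qs := ((probe_data.getD b pvD0).2).filter (fun vs => vs.contains tv) with hqs
  have hbq : b < (pvQual tv probe_data).length := by simp [pvQual, hb]
  have hqe : (pvQual tv probe_data)[b] = qs := by
    rw [← hqual, List.getD_eq_getElem _ _ hbq]
  rw [hqual, Bool.eq_iff_iff, List.all_eq_true, List.all_eq_true]
  constructor
  · intro h vs hvs
    obtain ⟨j, hj, rfl⟩ := List.mem_iff_getElem.mp hvs
    have := h j (by simpa using hj)
    rw [PySem.Set.contains_iff, pvIndexB_mem] at this
    obtain ⟨hi', hj', hv⟩ := this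
    have hee : (pvQual tv probe_data)[b][j]'hj' = qs[j] := by simp only [hqe]
    rw [List.contains_iff_mem]
    rwa [hee] at hv
  · intro h j hj
    rw [List.mem_range] at hj
    rw [PySem.Set.contains_iff, pvIndexB_mem]
    exact ⟨hbq, by simp [hqe, hj], by
      simp only [hqe]
      exact List.contains_iff_mem.mp (h qs[j] (List.getElem_mem hj))⟩

lemma pvOuter (tv : String) (allv nd : PySem.Set String)
    (probe_data : List (String × List (List String)))
    (hna : allv.Nodup) (hnn : nd.Nodup) (hsub : ∀ x ∈ nd, x ∈ allv) :
    ∀ (remaining : List Nat), (∀ i ∈ remaining, i < probe_data.length) →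
    ∀ (accA : Int × Option String) (accB : Int × Option Nat),
      accB.1 = accA.1 → accA.2 = accB.2.map (fun i => (probe_data.getD i pvD0).1) →
      0 ≤ accA.1 →
      (((remaining.map (fun i => probe_data.getD i pvD0)).foldl
          (fun (acc : Int × Option String) p =>
            p.2.foldl
              (fun (acc : Int × Option String) vs =>
                if PySem.Set.contains vs tv then
                  let remains := PySem.Set.diff allv vs
                  let inter := PySem.Set.inter remains nd
                  if PySem.Set.len inter > acc.1 then (PySem.Set.len inter, some p.1) else acc
                else acc) acc) accA)
        = (let resB := remaining.foldl
            (fun (acc : Int × Option Nat) i =>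
              if ((pvQual tv probe_data).map List.length).getD i 0 ≠ 0 then
                let s := PySem.Set.len nd
                  - pvMinB ((List.range (((pvQual tv probe_data).map List.length).getD i 0)).map
                      (fun j => (pvCntB (pvIndexB (pvQual tv probe_data)) nd).getD (i, j) 0))
                if s > acc.1 then (s, some i) else acc
              else acc) accB
           (resB.1, resB.2.map (fun i => (probe_data.getD i pvD0).1))))
      ∧ 0 ≤ (remaining.foldl
            (fun (acc : Int × Option Nat) i =>
              if ((pvQual tv probe_data).map List.length).getD i 0 ≠ 0 then
                let s := PySem.Set.len nd
                  - pvMinB ((List.range (((pvQual tv probe_data).map List.length).getD i 0)).map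
                      (fun j => (pvCntB (pvIndexB (pvQual tv probe_data)) nd).getD (i, j) 0))
                if s > acc.1 then (s, some i) else acc
              else acc) accB).1
      ∧ (∀ b, (remaining.foldl
            (fun (acc : Int × Option Nat) i =>
              if ((pvQual tv probe_data).map List.length).getD i 0 ≠ 0 then
                let s := PySem.Set.len nd
                  - pvMinB ((List.range (((pvQual tv probe_data).map List.length).getD i 0)).map
                      (fun j => (pvCntB (pvIndexB (pvQual tv probe_data)) nd).getD (i, j) 0))
                if s > acc.1 then (s, some i) else acc
              else acc) accB).2 = some b → b ∈ remaining ∨ accB.2 = some b) := by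
  intro remaining
  induction remaining with
  | nil =>
    intro _ accA accB h1 h2 h3
    refine ⟨?_, by simpa [h1] using h3, fun b hb => Or.inr hb⟩
    simp only [List.map_nil, List.foldl_nil]
    exact Prod.ext h1.symm h2
  | cons i rest ih =>
    intro hlt accA accB h1 h2 h3
    have hi : i < probe_data.length := hlt i List.mem_cons_self
    have hlen : PySem.Set.len nd = (nd.length : Int) := by simp [PySem.Set.len]
    have hk : ((pvQual tv probe_data).map List.length).getD i 0
        = ((pvQual tv probe_data).getD i []).length := by
      have hiq : i < (pvQual tv probe_data).length := by simp [pvQual, hi]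
      exact pvGetDMap (pvQual tv probe_data) List.length i hiq [] 0
    have hscore := pvScoreEq tv allv nd probe_data i hi hna hnn hsub
    simp only [List.map_cons, List.foldl_cons]
    rw [pvInnerA tv allv nd _ _ accA]
    rw [pvG_max tv allv nd _ accA.1 h3]
    by_cases hz : ((pvQual tv probe_data).getD i []).length = 0
    · -- no qualifying set: A's score is 0, neither side moves
      rw [if_pos hz] at hscore
      have hone : max accA.1 (pvG tv allv nd 0 (probe_data.getD i pvD0).2) = accA.1 := by
        rw [hscore]; omega
      have hcond : ¬ accA.1 < max accA.1 (pvG tv allv nd 0 (probe_data.getD i pvD0).2) := by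
        rw [hone]; omega
      rw [if_neg hcond, hone]
      have hskip : (if ((pvQual tv probe_data).map List.length).getD i 0 ≠ 0 then
            (if PySem.Set.len nd
                - pvMinB ((List.range (((pvQual tv probe_data).map List.length).getD i 0)).map
                    (fun j => (pvCntB (pvIndexB (pvQual tv probe_data)) nd).getD (i, j) 0))
                > accB.1 then
              (PySem.Set.len nd
                - pvMinB ((List.range (((pvQual tv probe_data).map List.length).getD i 0)).map
                    (fun j => (pvCntB (pvIndexB (pvQual tv probe_data)) nd).getD (i, j) 0)),
                some i)
            else accB)
          else accB) = accB := by
        rw [hk, if_neg (by omega)]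
      rw [hskip]
      have hres := ih (fun a ha => hlt a (List.mem_cons_of_mem _ ha)) accA accB h1 h2 h3
      exact ⟨hres.1, hres.2.1,
        fun b hb => (hres.2.2 b hb).elim (fun h => Or.inl (List.mem_cons_of_mem _ h)) Or.inr⟩
    · -- at least one qualifying set: B's s is A's probe score
      rw [if_neg hz] at hscore
      have hkne : ((pvQual tv probe_data).map List.length).getD i 0 ≠ 0 := by omega
      have hsB : PySem.Set.len nd
            - pvMinB ((List.range (((pvQual tv probe_data).map List.length).getD i 0)).map
                (fun j => (pvCntB (pvIndexB (pvQual tv probe_data)) nd).getD (i, j) 0))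
          = pvG tv allv nd 0 (probe_data.getD i pvD0).2 := by
        rw [hlen, hk, hscore]
      rw [show (if ((pvQual tv probe_data).map List.length).getD i 0 ≠ 0 then
            (if PySem.Set.len nd
                - pvMinB ((List.range (((pvQual tv probe_data).map List.length).getD i 0)).map
                    (fun j => (pvCntB (pvIndexB (pvQual tv probe_data)) nd).getD (i, j) 0))
                > accB.1 then
              (PySem.Set.len nd
                - pvMinB ((List.range (((pvQual tv probe_data).map List.length).getD i 0)).map
                    (fun j => (pvCntB (pvIndexB (pvQual tv probe_data)) nd).getD (i, j) 0)),
                some i)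
            else accB)
          else accB)
        = (if pvG tv allv nd 0 (probe_data.getD i pvD0).2 > accB.1 then
            (pvG tv allv nd 0 (probe_data.getD i pvD0).2, some i) else accB) by
        rw [if_pos hkne, hsB]]
      by_cases hc : pvG tv allv nd 0 (probe_data.getD i pvD0).2 > accA.1
      · have hcA : accA.1 < max accA.1 (pvG tv allv nd 0 (probe_data.getD i pvD0).2) := by omega
        have hmx : max accA.1 (pvG tv allv nd 0 (probe_data.getD i pvD0).2)
            = pvG tv allv nd 0 (probe_data.getD i pvD0).2 := by omega
        rw [if_pos hcA, if_pos (by omega : pvG tv allv nd 0 (probe_data.getD i pvD0).2 > accB.1),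
          hmx]
        have hres := ih (fun a ha => hlt a (List.mem_cons_of_mem _ ha))
          (pvG tv allv nd 0 (probe_data.getD i pvD0).2, some (probe_data.getD i pvD0).1)
          (pvG tv allv nd 0 (probe_data.getD i pvD0).2, some i)
          rfl (by simp) (le_trans h3 (by omega))
        refine ⟨hres.1, hres.2.1, fun b hb => ?_⟩
        rcases hres.2.2 b hb with h | h
        · exact Or.inl (List.mem_cons_of_mem _ h)
        · exact Or.inl (by rw [← Option.some_inj.mp h]; exact List.mem_cons_self)
      · have hcA : ¬ accA.1 < max accA.1 (pvG tv allv nd 0 (probe_data.getD i pvD0).2) := by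
          omega
        have hmx : max accA.1 (pvG tv allv nd 0 (probe_data.getD i pvD0).2) = accA.1 := by omega
        rw [if_neg hcA, if_neg (by omega : ¬ pvG tv allv nd 0 (probe_data.getD i pvD0).2 > accB.1),
          hmx]
        have hres := ih (fun a ha => hlt a (List.mem_cons_of_mem _ ha)) accA accB h1 h2 h3
        exact ⟨hres.1, hres.2.1,
          fun b hb => (hres.2.2 b hb).elim (fun h => Or.inl (List.mem_cons_of_mem _ h)) Or.inr⟩


lemma pvLoop_eq (probe_data : List (String × List (List String))) (tv : String)
    (allv : PySem.Set String)
    (hnodup : (probe_data.map Prod.fst).Nodup) (hna : allv.Nodup) :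
    ∀ (fuel : Nat) (selected : List String) (nd : PySem.Set String),
      nd.Nodup → (∀ x ∈ nd, x ∈ allv) →
      pvLoopA probe_data tv allv fuel selected nd
        = pvLoopB (probe_data.map Prod.fst) ((pvQual tv probe_data).map List.length)
            (pvIndexB (pvQual tv probe_data)) fuel
            ((List.range probe_data.length).filter
              (fun i => !(selected.contains ((probe_data.getD i pvD0).1))))
            nd selected := by
  intro fuel
  induction fuel with
  | zero => intro selected nd _ _; simp [pvLoopA, pvLoopB]
  | succ fuel ih =>
    intro selected nd hnn hsub
    rw [pvLoopA, pvLoopB]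
    have hbody : (fun (acc : Int × Option String) (p : String × List (List String)) =>
        if selected.contains p.1 then acc
        else p.2.foldl
          (fun (acc : Int × Option String) vs =>
            if PySem.Set.contains vs tv then
              let remains := PySem.Set.diff allv vs
              let inter := PySem.Set.inter remains nd
              if PySem.Set.len inter > acc.1 then (PySem.Set.len inter, some p.1) else acc
            else acc) acc)
      = (fun (acc : Int × Option String) (p : String × List (List String)) =>
        if (!(selected.contains p.1)) = true then
          p.2.foldl
            (fun (acc : Int × Option String) vs =>
              if PySem.Set.contains vs tv then
                let remains := PySem.Set.diff allv vs
                let inter := PySem.Set.inter remains nd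
                if PySem.Set.len inter > acc.1 then (PySem.Set.len inter, some p.1) else acc
              else acc) acc
        else acc) := by
      funext acc p
      cases h : selected.contains p.1 <;> simp
    rw [hbody, ← List.foldl_filter]
    have hpmap : probe_data.filter (fun p => !(selected.contains p.1))
        = (((List.range probe_data.length).filter
            (fun i => !(selected.contains ((probe_data.getD i pvD0).1)))).map
              (fun i => probe_data.getD i pvD0)) := by
      conv_lhs => rw [← pvSelfMap probe_data pvD0]
      rw [List.filter_map]
      rfl
    rw [hpmap]
    have hlt : ∀ i ∈ (List.range probe_data.length).filter
        (fun i => !(selected.contains ((probe_data.getD i pvD0).1))), i < probe_data.length := by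
      intro i hi
      simpa using List.mem_range.mp (List.mem_of_mem_filter hi)
    obtain ⟨hEq, hpos, hmem⟩ := pvOuter tv allv nd probe_data hna hnn hsub _ hlt
      (0, none) (0, none) rfl rfl (le_refl 0)
    rw [hEq]
    cases hB : ((List.range probe_data.length).filter
        (fun i => !(selected.contains ((probe_data.getD i pvD0).1)))).foldl
        (fun (acc : Int × Option Nat) i =>
          if ((pvQual tv probe_data).map List.length).getD i 0 ≠ 0 then
            let s := PySem.Set.len nd
              - pvMinB ((List.range (((pvQual tv probe_data).map List.length).getD i 0)).map
                  (fun j => (pvCntB (pvIndexB (pvQual tv probe_data)) nd).getD (i, j) 0))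
            if s > acc.1 then (s, some i) else acc
          else acc) ((0 : Int), (none : Option Nat)) with
    | mk v o =>
    cases o with
    | none => simp
    | some b =>
      simp only [Option.map_some]
      have hbmem : b ∈ (List.range probe_data.length).filter
          (fun i => !(selected.contains ((probe_data.getD i pvD0).1))) := by
        rcases hmem b (by rw [hB]) with h | h
        · exact h
        · exact absurd h (by simp)
      have hb : b < probe_data.length := hlt b hbmem
      -- A's dict lookup of the chosen probe's sets
      have hget : (PySem.Dict.mk probe_data).getD ((probe_data.getD b pvD0).1) []
          = (probe_data.getD b pvD0).2 := by
        have hmemit : (((probe_data.getD b pvD0).1), ((probe_data.getD b pvD0).2))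
            ∈ (PySem.Dict.mk probe_data).items := by
          show _ ∈ probe_data
          rw [List.getD_eq_getElem _ _ hb]
          exact List.getElem_mem hb
        exact PySem.Dict.getD_of_mem_items _ hmemit (by simpa using hnodup) []
      rw [hget]
      -- the two undistinguished-set updates agree
      have hk : ((pvQual tv probe_data).map List.length).getD b 0
          = ((pvQual tv probe_data).getD b []).length := by
        have hbq : b < (pvQual tv probe_data).length := by simp [pvQual, hb]
        exact pvGetDMap (pvQual tv probe_data) List.length b hbq [] 0
      have hupd : ((probe_data.getD b pvD0).2).foldl
          (fun nd vs =>
            if PySem.Set.contains vs tv then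
              PySem.Set.diff nd (PySem.Set.diff allv vs)
            else nd) nd
          = nd.filter (fun v => (List.range (((pvQual tv probe_data).map List.length).getD b 0)).all
              (fun j => PySem.Set.contains
                ((pvIndexB (pvQual tv probe_data)).getD v PySem.Set.empty) (b, j))) := by
        rw [pvUpdateA tv allv _ nd hsub]
        apply List.filter_congr
        intro v _
        rw [hk, pvUpdPredB tv probe_data b hb v]
      rw [hupd]
      -- the appended probe names agree
      have hname : (probe_data.map Prod.fst).getD b "" = (probe_data.getD b pvD0).1 :=
        pvGetDMap probe_data Prod.fst b hb pvD0 ""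
      rw [hname]
      -- the shrunken remaining list keeps the invariant for selected ++ [name b]
      have hrem : ((List.range probe_data.length).filter
            (fun i => !(selected.contains ((probe_data.getD i pvD0).1)))).filter
              (fun r => r != b)
          = (List.range probe_data.length).filter
              (fun i => !((selected ++ [(probe_data.getD b pvD0).1]).contains
                ((probe_data.getD i pvD0).1))) := by
        rw [List.filter_filter]
        apply List.filter_congr
        intro i hi
        have hilt : i < probe_data.length := by simpa using List.mem_range.mp hi
        have hinj : ((probe_data.getD i pvD0).1 = (probe_data.getD b pvD0).1) ↔ i = b := by
          rw [List.getD_eq_getElem _ _ hilt, List.getD_eq_getElem _ _ hb]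
          rw [show probe_data[i].1 = (probe_data.map Prod.fst)[i]'(by simpa using hilt) by simp,
            show probe_data[b].1 = (probe_data.map Prod.fst)[b]'(by simpa using hb) by simp]
          exact hnodup.getElem_inj_iff
        by_cases hib : i = b
        · simp [hib]
        · have hne : ((probe_data.getD i pvD0).1 == (probe_data.getD b pvD0).1) = false := by
            simp only [beq_eq_false_iff_ne]
            exact fun h => hib (hinj.mp h)
          have h2 : (probe_data.getD i pvD0).1 ≠ (probe_data.getD b pvD0).1 :=
            fun h => hib (hinj.mp h)
          rw [Bool.eq_iff_iff]
          simp only [List.contains_append, hib, h2]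
          simp [hib]
          exact fun _ => h2
      rw [hrem]
      exact ih _ _ (List.Nodup.filter _ hnn) (fun x hx => hsub x (List.mem_of_mem_filter hx))

lemma pvAllvNodup (probe_data : List (String × List (List String))) :
    (probe_data.foldl (fun s p => p.2.foldl (fun s vs => PySem.Set.update s vs) s)
      PySem.Set.empty).Nodup := by
  have hstep : ∀ (l : List (String × List (List String))) (s : PySem.Set String),
      s.Nodup → (l.foldl (fun s p => p.2.foldl (fun s vs => PySem.Set.update s vs) s) s).Nodup := by
    intro l
    induction l with
    | nil => intro s hs; exact hs
    | cons p rest ih =>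
      intro s hs
      refine ih _ ?_
      have hinner : ∀ (sets : List (List String)) (s : PySem.Set String),
          s.Nodup → (sets.foldl (fun s vs => PySem.Set.update s vs) s).Nodup := by
        intro sets
        induction sets with
        | nil => intro s hs; exact hs
        | cons vs rest ih2 => intro s hs; exact ih2 _ (PySem.Set.nodup_update s vs hs)
      exact hinner p.2 s hs
  exact hstep probe_data PySem.Set.empty (by simp [PySem.Set.empty])

-- ===== VERDICT (by name: the statement is the Claim_ definition above) =====
theorem split_version_by_greedy_spec : Claim_equal_split_version_by_greedy := by
  intro probe_data target_version _hdom hpre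
  unfold Spec_split_version_by_greedy
  unfold split_version_by_greedy split_version_by_greedy_alt
  simp only [PySem.Set.union]
  by_cases hc : PySem.Set.contains
      (probe_data.foldl (fun s p => p.2.foldl (fun s vs => PySem.Set.update s vs) s)
        PySem.Set.empty) target_version
  · simp only [hc, Bool.not_true, Bool.false_eq_true, if_false]
    have hna := pvAllvNodup probe_data
    rw [show (probe_data.foldl (fun s p => p.2.foldl (fun s vs => PySem.Set.update s vs) s)
          PySem.Set.empty).discard target_version
        = (probe_data.foldl (fun s p => p.2.foldl (fun s vs => PySem.Set.update s vs) s)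
            PySem.Set.empty).filter (fun v => v != target_version) from rfl]
    rw [pvLoop_eq probe_data target_version _ hpre hna (probe_data.length + 1) []
      ((probe_data.foldl (fun s p => p.2.foldl (fun s vs => PySem.Set.update s vs) s)
          PySem.Set.empty).filter (fun v => v != target_version))
      (List.Nodup.filter _ hna) (fun x hx => List.mem_of_mem_filter hx)]
    congr 1
    simp
  · simp only [hc, Bool.not_false, if_true]
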